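-- pv_equiv track=rewrite | github.com/kp2657/causal-graph-engine | steps/tier5_writer/report_builder.py | _evidence_quality_section
-- ===== SOURCE A (Python) =====
-- def _evidence_quality_section(
--     causal_result: dict,
--     n_virtual: int,
-- ) -> dict:
--     """Compile mandatory evidence quality metrics."""
--     top_genes = causal_result.get("top_genes", [])
--
--     n_tier1 = sum(1 for g in top_genes if g.get("tier") == "Tier1_Interventional")
--     n_tier2 = sum(1 for g in top_genes if g.get("tier") == "Tier2_Convergent")
--     n_tier3 = sum(
--         1 for g in top_genes
--         if g.get("tier") in ("Tier3_Provisional", "moderate_transferred", "moderate_grn")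
--     )
--     n_virtual_edges = sum(1 for g in top_genes if g.get("tier") == "provisional_virtual")
--
--     return {
--         "n_tier1_edges":   n_tier1,
--         "n_tier2_edges":   n_tier2,
--         "n_tier3_edges":   n_tier3,
--         "n_virtual_edges": n_virtual_edges,
--         "min_evalue":      None,
--     }
-- ===== SOURCE B (Python) =====
-- def _evidence_quality_section(
--     causal_result: dict,
--     n_virtual: int,
-- ) -> dict:
--     """Compile mandatory evidence quality metrics (single-pass frequency table)."""
--     counts = {}
--     for g in causal_result.get("top_genes", []):
--         t = g.get("tier")
--         counts[t] = counts.get(t, 0) + 1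
--
--     return {
--         "n_tier1_edges":   counts.get("Tier1_Interventional", 0),
--         "n_tier2_edges":   counts.get("Tier2_Convergent", 0),
--         "n_tier3_edges":   (counts.get("Tier3_Provisional", 0)
--                             + counts.get("moderate_transferred", 0)
--                             + counts.get("moderate_grn", 0)),
--         "n_virtual_edges": counts.get("provisional_virtual", 0),
--         "min_evalue":      None,
--     }
-- ===== Notes on version B (the rewrite author's own statement) =====
-- stated objective: simpler
-- what changed: Replaces four separate scans of top_genes (one generator-sum per tier category) with a single pass that builds a tier frequency table and then reads the five fields off it by key lookup.
import Mathlib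
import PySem

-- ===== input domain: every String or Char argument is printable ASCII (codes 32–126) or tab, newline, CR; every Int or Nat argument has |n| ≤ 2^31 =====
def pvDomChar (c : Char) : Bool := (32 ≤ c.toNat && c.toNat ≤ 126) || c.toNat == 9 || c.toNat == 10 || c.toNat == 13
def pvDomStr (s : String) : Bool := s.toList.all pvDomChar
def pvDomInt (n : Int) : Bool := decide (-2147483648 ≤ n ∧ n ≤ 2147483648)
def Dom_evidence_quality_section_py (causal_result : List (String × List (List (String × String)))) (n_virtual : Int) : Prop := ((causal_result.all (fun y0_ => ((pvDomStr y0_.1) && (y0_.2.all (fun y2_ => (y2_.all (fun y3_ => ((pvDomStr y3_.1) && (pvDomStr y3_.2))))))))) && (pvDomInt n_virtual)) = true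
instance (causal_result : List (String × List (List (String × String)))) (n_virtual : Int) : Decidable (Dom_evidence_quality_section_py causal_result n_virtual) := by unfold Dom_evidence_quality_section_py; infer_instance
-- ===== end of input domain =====

-- B replaces A's four separate scans of top_genes with one pass building a tier
-- frequency table, then reads the result off it by key lookup (objective: simpler).

-- shared helper: g.get("tier")
def pvTier (g : List (String × String)) : Option String := (PySem.Dict.mk g).get? "tier"

-- ===== PORT A =====
def evidence_quality_section_py (causal_result : List (String × List (List (String × String)))) (n_virtual : Int) : List (String × Option Int) :=
  let top_genes := (PySem.Dict.mk causal_result).getD "top_genes" []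
  let n_tier1 : Int := top_genes.foldl (fun acc g => if pvTier g == some "Tier1_Interventional" then acc + 1 else acc) 0
  let n_tier2 : Int := top_genes.foldl (fun acc g => if pvTier g == some "Tier2_Convergent" then acc + 1 else acc) 0
  let n_tier3 : Int := top_genes.foldl (fun acc g =>
    if pvTier g == some "Tier3_Provisional" || pvTier g == some "moderate_transferred" || pvTier g == some "moderate_grn"
    then acc + 1 else acc) 0
  let n_virtual_edges : Int := top_genes.foldl (fun acc g => if pvTier g == some "provisional_virtual" then acc + 1 else acc) 0
  [("n_tier1_edges", some n_tier1),
   ("n_tier2_edges", some n_tier2),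
   ("n_tier3_edges", some n_tier3),
   ("n_virtual_edges", some n_virtual_edges),
   ("min_evalue", none)]

-- ===== PORT B =====
def evidence_quality_section_py_alt (causal_result : List (String × List (List (String × String)))) (n_virtual : Int) : List (String × Option Int) :=
  let top_genes := (PySem.Dict.mk causal_result).getD "top_genes" []
  let counts : PySem.Dict (Option String) Int :=
    top_genes.foldl (fun d g => d.insert (pvTier g) (d.getD (pvTier g) 0 + 1)) PySem.Dict.empty
  [("n_tier1_edges", some (counts.getD (some "Tier1_Interventional") 0)),
   ("n_tier2_edges", some (counts.getD (some "Tier2_Convergent") 0)),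
   ("n_tier3_edges", some (counts.getD (some "Tier3_Provisional") 0
                           + counts.getD (some "moderate_transferred") 0
                           + counts.getD (some "moderate_grn") 0)),
   ("n_virtual_edges", some (counts.getD (some "provisional_virtual") 0)),
   ("min_evalue", none)]

-- ===== PRECONDITION & SPEC =====
def Spec_evidence_quality_section_py (causal_result : List (String × List (List (String × String)))) (n_virtual : Int) (out : List (String × Option Int)) : Prop := out = evidence_quality_section_py_alt causal_result n_virtual
instance (causal_result : List (String × List (List (String × String)))) (n_virtual : Int) (out : List (String × Option Int)) : Decidable (Spec_evidence_quality_section_py causal_result n_virtual out) := by unfold Spec_evidence_quality_section_py; infer_instance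

-- ===== CLAIM (what is proved, stated in full; the proofs are below) =====
def Claim_equal_evidence_quality_section_py : Prop := ∀ (causal_result : List (String × List (List (String × String)))) (n_virtual : Int), Dom_evidence_quality_section_py causal_result n_virtual → Spec_evidence_quality_section_py causal_result n_virtual (evidence_quality_section_py causal_result n_virtual)

-- ===== LEMMAS AND PROOFS =====

-- A's counting loop computes a countP
theorem pv_foldl_if {G : Type} (p : G → Bool) (l : List G) (acc : Int) :
    l.foldl (fun a g => if p g then a + 1 else a) acc = acc + l.countP p := by
  induction l generalizing acc with
  | nil => simp
  | cons x xs ih =>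
    simp only [List.foldl_cons, List.countP_cons, ih]
    by_cases h : p x <;> simp [h] <;> omega

-- B's table entry at key k is the number of genes whose tier is k
theorem pv_counts_getD (l : List (List (String × String))) (k : Option String) :
    (l.foldl (fun d g => d.insert (pvTier g) (d.getD (pvTier g) 0 + 1)) PySem.Dict.empty).getD k 0
      = (l.countP (fun g => pvTier g == k) : Int) := by
  suffices h : ∀ (l : List (List (String × String))) (d : PySem.Dict (Option String) Int),
      (l.foldl (fun d g => d.insert (pvTier g) (d.getD (pvTier g) 0 + 1)) d).getD k 0
        = d.getD k 0 + (l.countP (fun g => pvTier g == k) : Int) by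
    simpa [PySem.Dict.getD_empty] using h l PySem.Dict.empty
  intro l
  induction l with
  | nil => simp
  | cons x xs ih =>
    intro d
    simp only [List.foldl_cons, List.countP_cons, ih, PySem.Dict.getD_insert]
    by_cases h : pvTier x = k
    · subst h; simp; omega
    · simp [h, Ne.symm h]

-- a disjoint three-way disjunction splits the count
theorem pv_countP_or3 {G : Type} (f : G → Option String) (a b c : Option String)
    (hab : a ≠ b) (hac : a ≠ c) (hbc : b ≠ c) (l : List G) :
    l.countP (fun g => f g == a || f g == b || f g == c)
      = l.countP (fun g => f g == a) + l.countP (fun g => f g == b) + l.countP (fun g => f g == c) := by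
  induction l with
  | nil => simp
  | cons x xs ih =>
    simp only [List.countP_cons, ih]
    by_cases h1 : f x = a <;> by_cases h2 : f x = b <;> by_cases h3 : f x = c <;>
      simp_all <;> omega

-- ===== VERDICT (by name: the statement is the Claim_ definition above) =====
theorem evidence_quality_section_py_spec : Claim_equal_evidence_quality_section_py := by
  intro causal_result n_virtual _
  unfold Spec_evidence_quality_section_py evidence_quality_section_py evidence_quality_section_py_alt
  simp only [pv_foldl_if, pv_counts_getD, zero_add]
  rw [pv_countP_or3 pvTier (some "Tier3_Provisional") (some "moderate_transferred") (some "moderate_grn")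
    (by decide) (by decide) (by decide)]
  push_cast
  ring_nf
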